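-- pv_equiv track=rewrite | github.com/MrBrantCode/unitest_baseline | mut_generate/mist_train_taco/taco_4231/solution.py | count_substrings_containing_t
-- ===== SOURCE A (Python) =====
-- def count_substrings_containing_t(S: str, T: str) -> int:
--     def get_all_substrings(string: str) -> list:
--         length = len(string)
--         alist = []
--         for i in range(length):
--             for j in range(i, length):
--                 substring = string[i:j + 1]
--                 if substring not in alist:
--                     alist.append(substring)
--         return alist
--
--     all_substrings = get_all_substrings(S)
--     count = 0
--     for substring in all_substrings:
--         if T in substring:
--             count += 1
--     return count
-- ===== SOURCE B (Python) =====
-- def count_substrings_containing_t(S: str, T: str) -> int: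
--     n, m = len(S), len(T)
--     # index every occurrence of T in S
--     occs = [p for p in range(n - m + 1) if S[p:p + m] == T]
--     result = set()
--     for p in occs:
--         for i in range(p + 1):
--             for j in range(max(i, p + m - 1), n):
--                 result.add(S[i:j + 1])
--     return len(result)
-- ===== Notes on version B (the rewrite author's own statement) =====
-- stated objective: faster
-- what changed: A enumerates every distinct substring via a quadratic not-in dedup list and then tests T-containment on each; B first builds an occurrence index of T in S and then enumerates only the substrings enclosing an occurrence, collecting them in a hash set.
import Mathlib
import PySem

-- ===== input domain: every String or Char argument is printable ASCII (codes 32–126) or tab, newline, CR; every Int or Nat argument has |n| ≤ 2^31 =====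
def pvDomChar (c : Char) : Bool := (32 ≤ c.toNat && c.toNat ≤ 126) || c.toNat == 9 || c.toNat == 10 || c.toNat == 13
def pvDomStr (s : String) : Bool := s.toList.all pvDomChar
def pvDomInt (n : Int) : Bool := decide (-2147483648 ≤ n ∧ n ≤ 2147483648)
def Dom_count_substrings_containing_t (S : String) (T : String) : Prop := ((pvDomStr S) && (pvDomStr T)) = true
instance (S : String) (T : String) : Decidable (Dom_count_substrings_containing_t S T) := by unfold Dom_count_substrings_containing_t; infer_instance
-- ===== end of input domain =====

-- B replaces A's "enumerate every distinct substring through a list-based dedup, then test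
-- containment" by an occurrence index of T in S followed by enumeration of only the substrings
-- enclosing an occurrence, collected in a set (measured faster in a timing run).

-- ===== PORT A =====
-- Python's inner helper get_all_substrings: dedup list of all substrings, in (i, j) order
def pvGetAllSubstrings (s : List Char) : List (List Char) :=
  (PySem.List.pyRange 0 (PySem.List.len s) 1).foldl (fun alist i =>
    (PySem.List.pyRange i (PySem.List.len s) 1).foldl (fun alist j =>
      let substring := PySem.List.slice s (some i) (some (j + 1))
      if alist.contains substring then alist else alist ++ [substring]) alist) []

def count_substrings_containing_t (S : String) (T : String) : Int :=
  (pvGetAllSubstrings S.toList).foldl (fun count substring =>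
    if PySem.Chars.isIn T.toList substring then count + 1 else count) 0

-- ===== PORT B =====
-- occurrence index: [p for p in range(n - m + 1) if S[p:p+m] == T]
def pvOccs (s t : List Char) : List Int :=
  (PySem.List.pyRange 0 (PySem.List.len s - PySem.List.len t + 1) 1).filter
    (fun p => PySem.List.slice s (some p) (some (p + PySem.List.len t)) == t)

-- the set of substrings S[i:j+1] enclosing some occurrence p
def pvResult (s t : List Char) : PySem.Set (List Char) :=
  (pvOccs s t).foldl (fun res p =>
    (PySem.List.pyRange 0 (p + 1) 1).foldl (fun res i =>
      (PySem.List.pyRange (max i (p + PySem.List.len t - 1)) (PySem.List.len s) 1).foldl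
        (fun res j => PySem.Set.add res (PySem.List.slice s (some i) (some (j + 1)))) res) res)
    PySem.Set.empty

def count_substrings_containing_t_alt (S : String) (T : String) : Int :=
  PySem.Set.len (pvResult S.toList T.toList)

-- ===== PRECONDITION & SPEC =====
def Spec_count_substrings_containing_t (S : String) (T : String) (out : Int) : Prop := out = count_substrings_containing_t_alt S T
instance (S : String) (T : String) (out : Int) : Decidable (Spec_count_substrings_containing_t S T out) := by unfold Spec_count_substrings_containing_t; infer_instance

-- ===== CLAIM (what is proved, stated in full; the proofs are below) =====
def Claim_equal_count_substrings_containing_t : Prop := ∀ (S : String) (T : String), Dom_count_substrings_containing_t S T → Spec_count_substrings_containing_t S T (count_substrings_containing_t S T)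

-- ===== LEMMAS AND PROOFS =====

-- substring S[i:j+1] for Nat indices (proof-side normal form of both ports' slices)
def pvSubAt (s : List Char) (i j : Nat) : List Char := (s.drop i).take (j + 1 - i)

-- membership in a fold whose step satisfies a membership law
theorem pv_mem_foldl_step {α β : Type} (step : List α → β → List α) (P : β → α → Prop)
    (h : ∀ s b x, x ∈ step s b ↔ x ∈ s ∨ P b x) (l : List β) (s0 : List α) (x : α) :
    x ∈ l.foldl step s0 ↔ x ∈ s0 ∨ ∃ b ∈ l, P b x := by
  induction l generalizing s0 with
  | nil => simp
  | cons b l ih =>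
    rw [List.foldl_cons, ih, h]
    constructor
    · rintro ((h0 | hp) | ⟨c, hc, hp⟩)
      · exact Or.inl h0
      · exact Or.inr ⟨b, List.mem_cons_self, hp⟩
      · exact Or.inr ⟨c, List.mem_cons_of_mem b hc, hp⟩
    · rintro (h0 | ⟨c, hc, hp⟩)
      · exact Or.inl (Or.inl h0)
      · rcases List.mem_cons.mp hc with rfl | hc'
        · exact Or.inl (Or.inr hp)
        · exact Or.inr ⟨c, hc', hp⟩

theorem pv_nodup_foldl_step {α β : Type} (step : List α → β → List α)
    (h : ∀ s b, s.Nodup → (step s b).Nodup) (l : List β) (s0 : List α) (h0 : s0.Nodup) :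
    (l.foldl step s0).Nodup := by
  induction l generalizing s0 with
  | nil => exact h0
  | cons b l ih => exact ih _ (h _ _ h0)

-- A's "if substring not in alist: alist.append(substring)" is set-insertion
theorem pv_mem_addlike (alist : List (List Char)) (sub x : List Char) :
    x ∈ (if alist.contains sub then alist else alist ++ [sub]) ↔ x ∈ alist ∨ x = sub := by
  split_ifs with h
  · have hs : sub ∈ alist := by simpa using h
    constructor
    · exact fun hx => Or.inl hx
    · rintro (hx | rfl)
      · exact hx
      · exact hs
  · constructor
    · intro hx
      rcases List.mem_append.mp hx with hx | hx
      · exact Or.inl hx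
      · exact Or.inr (List.mem_singleton.mp hx)
    · rintro (hx | rfl)
      · exact List.mem_append_left _ hx
      · exact List.mem_append_right _ (List.mem_singleton.mpr rfl)

theorem pv_nodup_addlike (alist : List (List Char)) (sub : List Char) (h : alist.Nodup) :
    (if alist.contains sub then alist else alist ++ [sub]).Nodup := by
  split_ifs with hc
  · exact h
  · have hns : sub ∉ alist := by simpa using hc
    refine List.Nodup.append h (List.nodup_singleton _) ?_
    intro a ha hb
    rw [List.mem_singleton] at hb
    subst hb
    exact hns ha

theorem pv_slice_eq (s : List Char) (i j : Int) (h0 : 0 ≤ i) (hij : i ≤ j) :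
    PySem.List.slice s (some i) (some (j + 1)) = pvSubAt s i.toNat j.toNat := by
  rw [PySem.List.slice_toNat s h0 (by omega)]
  unfold pvSubAt
  congr 1
  omega

theorem pv_memA_int (s : List Char) (x : List Char) :
    x ∈ pvGetAllSubstrings s ↔ ∃ i jj : Int, 0 ≤ i ∧ i ≤ jj ∧ jj < PySem.List.len s ∧
      x = PySem.List.slice s (some i) (some (jj + 1)) := by
  have hinner : ∀ (alist : List (List Char)) (i : Int) (y : List Char),
      y ∈ (PySem.List.pyRange i (PySem.List.len s) 1).foldl (fun alist j =>
        let substring := PySem.List.slice s (some i) (some (j + 1))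
        if alist.contains substring then alist else alist ++ [substring]) alist ↔
      y ∈ alist ∨ ∃ jj ∈ PySem.List.pyRange i (PySem.List.len s) 1,
        y = PySem.List.slice s (some i) (some (jj + 1)) := by
    intro alist i y
    refine pv_mem_foldl_step _
      (fun jj (z : List Char) => z = PySem.List.slice s (some i) (some (jj + 1))) ?_ _ _ y
    intro a b z
    exact pv_mem_addlike a _ z
  unfold pvGetAllSubstrings
  rw [pv_mem_foldl_step _
    (fun i (z : List Char) => ∃ jj ∈ PySem.List.pyRange i (PySem.List.len s) 1,
      z = PySem.List.slice s (some i) (some (jj + 1))) (fun a b z => hinner a b z)]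
  simp only [List.not_mem_nil, false_or, PySem.List.mem_pyRange_one]
  constructor
  · rintro ⟨i, ⟨hi0, _⟩, jj, ⟨hij, hjn⟩, hx⟩
    exact ⟨i, jj, hi0, hij, hjn, hx⟩
  · rintro ⟨i, jj, hi0, hij, hjn, hx⟩
    exact ⟨i, ⟨hi0, by omega⟩, jj, ⟨hij, hjn⟩, hx⟩

theorem pv_memA (s : List Char) (x : List Char) :
    x ∈ pvGetAllSubstrings s ↔ ∃ i j : Nat, i ≤ j ∧ j < s.length ∧ x = pvSubAt s i j := by
  rw [pv_memA_int]
  constructor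
  · rintro ⟨i, jj, hi0, hij, hjn, hx⟩
    rw [PySem.List.len_eq] at hjn
    refine ⟨i.toNat, jj.toNat, by omega, by omega, ?_⟩
    rw [hx, pv_slice_eq s i jj hi0 hij]
  · rintro ⟨i, j, hij, hjn, hx⟩
    refine ⟨(i : Int), (j : Int), by omega, by omega, ?_, ?_⟩
    · rw [PySem.List.len_eq]; omega
    · rw [pv_slice_eq s i j (by omega) (by omega)]
      simpa using hx

theorem pv_nodupA (s : List Char) : (pvGetAllSubstrings s).Nodup := by
  unfold pvGetAllSubstrings
  exact pv_nodup_foldl_step _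
    (fun a b ha => pv_nodup_foldl_step _ (fun a' b' ha' => pv_nodup_addlike a' _ ha') _ _ ha)
    _ _ (by simp)

theorem pv_slice_occ (s t : List Char) (p : Int) (hp : 0 ≤ p) :
    PySem.List.slice s (some p) (some (p + PySem.List.len t)) = (s.drop p.toNat).take t.length := by
  have hlt : PySem.List.len t = (t.length : Int) := PySem.List.len_eq t
  rw [PySem.List.slice_toNat s hp (by omega)]
  congr 1
  omega

theorem pv_mem_occs (s t : List Char) (p : Int) :
    p ∈ pvOccs s t ↔ 0 ≤ p ∧ p + PySem.List.len t ≤ PySem.List.len s ∧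
      (s.drop p.toNat).take t.length = t := by
  unfold pvOccs
  rw [List.mem_filter]
  simp only [PySem.List.mem_pyRange_one, beq_iff_eq]
  constructor
  · rintro ⟨⟨hp0, hpn⟩, he⟩
    rw [pv_slice_occ s t p hp0] at he
    exact ⟨hp0, by omega, he⟩
  · rintro ⟨hp0, hpn, he⟩
    exact ⟨⟨hp0, by omega⟩, by rw [pv_slice_occ s t p hp0]; exact he⟩

theorem pv_memB (s t : List Char) (x : List Char) :
    x ∈ pvResult s t ↔ ∃ p i j : Nat,
      (s.drop p).take t.length = t ∧ p + t.length ≤ s.length ∧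
      i ≤ p ∧ i ≤ j ∧ p + t.length ≤ j + 1 ∧ j < s.length ∧ x = pvSubAt s i j := by
  have hlev3 : ∀ (res : List (List Char)) (i lo : Int) (y : List Char),
      y ∈ (PySem.List.pyRange lo (PySem.List.len s) 1).foldl
        (fun res j => PySem.Set.add res (PySem.List.slice s (some i) (some (j + 1)))) res ↔
      y ∈ res ∨ ∃ j ∈ PySem.List.pyRange lo (PySem.List.len s) 1,
        y = PySem.List.slice s (some i) (some (j + 1)) := by
    intro res i lo y
    refine pv_mem_foldl_step _
      (fun j (z : List Char) => z = PySem.List.slice s (some i) (some (j + 1))) ?_ _ _ y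
    intro a b z
    exact PySem.Set.mem_add a _ z
  have hlev2 : ∀ (res : List (List Char)) (pp : Int) (y : List Char),
      y ∈ (PySem.List.pyRange 0 (pp + 1) 1).foldl (fun res i =>
        (PySem.List.pyRange (max i (pp + PySem.List.len t - 1)) (PySem.List.len s) 1).foldl
          (fun res j => PySem.Set.add res (PySem.List.slice s (some i) (some (j + 1)))) res) res ↔
      y ∈ res ∨ ∃ i ∈ PySem.List.pyRange 0 (pp + 1) 1,
        ∃ j ∈ PySem.List.pyRange (max i (pp + PySem.List.len t - 1)) (PySem.List.len s) 1,
          y = PySem.List.slice s (some i) (some (j + 1)) := by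
    intro res pp y
    refine pv_mem_foldl_step _
      (fun i (z : List Char) =>
        ∃ j ∈ PySem.List.pyRange (max i (pp + PySem.List.len t - 1)) (PySem.List.len s) 1,
          z = PySem.List.slice s (some i) (some (j + 1))) ?_ _ _ y
    intro a b z
    exact hlev3 a b _ z
  have hlev1 : x ∈ pvResult s t ↔ x ∈ (PySem.Set.empty : PySem.Set (List Char)) ∨
      ∃ p ∈ pvOccs s t, ∃ i ∈ PySem.List.pyRange 0 (p + 1) 1,
        ∃ j ∈ PySem.List.pyRange (max i (p + PySem.List.len t - 1)) (PySem.List.len s) 1,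
          x = PySem.List.slice s (some i) (some (j + 1)) := by
    unfold pvResult
    refine pv_mem_foldl_step _
      (fun p (z : List Char) => ∃ i ∈ PySem.List.pyRange 0 (p + 1) 1,
        ∃ j ∈ PySem.List.pyRange (max i (p + PySem.List.len t - 1)) (PySem.List.len s) 1,
          z = PySem.List.slice s (some i) (some (j + 1))) ?_ _ _ x
    intro a b z
    exact hlev2 a b z
  rw [hlev1]
  have hempty : x ∈ (PySem.Set.empty : PySem.Set (List Char)) ↔ False := by
    simp [PySem.Set.empty]
  rw [hempty, false_or]
  have hlt : PySem.List.len t = (t.length : Int) := PySem.List.len_eq t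
  have hls : PySem.List.len s = (s.length : Int) := PySem.List.len_eq s
  constructor
  · rintro ⟨p, hp, i, hi, j, hj, hx⟩
    rw [pv_mem_occs] at hp
    obtain ⟨hp0, hpn, hocc⟩ := hp
    rw [PySem.List.mem_pyRange_one] at hi hj
    obtain ⟨hi0, hip⟩ := hi
    obtain ⟨hjlo, hjn⟩ := hj
    have hmaxi : i ≤ j := le_trans (le_max_left _ _) hjlo
    have hmaxp : p + PySem.List.len t - 1 ≤ j := le_trans (le_max_right _ _) hjlo
    refine ⟨p.toNat, i.toNat, j.toNat, hocc, by omega, by omega, by omega, by omega, by omega, ?_⟩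
    rw [hx, pv_slice_eq s i j hi0 hmaxi]
  · rintro ⟨p, i, j, hocc, hpn, hip, hij, hpj, hjn, hx⟩
    refine ⟨(p : Int), ?_, (i : Int), ?_, (j : Int), ?_, ?_⟩
    · rw [pv_mem_occs]
      exact ⟨by omega, by omega, by simpa using hocc⟩
    · rw [PySem.List.mem_pyRange_one]
      constructor
      · omega
      · omega
    · rw [PySem.List.mem_pyRange_one]
      constructor
      · apply max_le
        · omega
        · omega
      · omega
    · rw [pv_slice_eq s i j (by omega) (by omega)]
      simpa using hx

theorem pv_nodupB (s t : List Char) : (pvResult s t).Nodup := by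
  unfold pvResult
  exact pv_nodup_foldl_step _
    (fun a b ha => pv_nodup_foldl_step _
      (fun a' b' ha' => pv_nodup_foldl_step _
        (fun a'' b'' ha'' => PySem.Set.nodup_add a'' _ ha'') _ _ ha') _ _ ha)
    _ _ (by simp [PySem.Set.empty])

theorem pv_subAt_drop (s : List Char) (i j q : Nat) :
    (pvSubAt s i j).drop q = (s.drop (i + q)).take (j + 1 - i - q) := by
  unfold pvSubAt
  rw [List.drop_take, List.drop_drop]

theorem pv_subAt_length (s : List Char) (i j : Nat) (hij : i ≤ j) (hj : j < s.length) :
    (pvSubAt s i j).length = j + 1 - i := by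
  unfold pvSubAt
  rw [List.length_take, List.length_drop]
  omega

-- T is contained in S[i:j+1] iff some occurrence of T in S lies inside [i, j]
theorem pv_core (s t : List Char) (i j : Nat) (hij : i ≤ j) (hj : j < s.length) :
    PySem.Chars.isIn t (pvSubAt s i j) = true ↔
      ∃ p : Nat, i ≤ p ∧ p + t.length ≤ j + 1 ∧ (s.drop p).take t.length = t := by
  rw [← PySem.Chars.exists_prefix_drop_iff_isIn]
  constructor
  · rintro ⟨q, hpre⟩
    have hlen : t.length ≤ (pvSubAt s i j).length - q := by
      have := hpre.length_le
      rwa [List.length_drop] at this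
    rw [pv_subAt_length s i j hij hj] at hlen
    by_cases hm : t.length = 0
    · have ht : t = [] := List.length_eq_zero_iff.mp hm
      exact ⟨i, le_refl i, by omega, by simp [ht]⟩
    · have hq : q < j + 1 - i := by omega
      have hdrop : (pvSubAt s i j).drop q = (s.drop (i + q)).take (j + 1 - i - q) :=
        pv_subAt_drop s i j q
      have ht : t = ((s.drop (i + q)).take (j + 1 - i - q)).take t.length := by
        rw [← hdrop]
        exact List.prefix_iff_eq_take.mp hpre
      rw [List.take_take] at ht
      have hmin : min t.length (j + 1 - i - q) = t.length := by omega
      rw [hmin] at ht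
      exact ⟨i + q, by omega, by omega, ht.symm⟩
  · rintro ⟨p, hip, hpj, ht⟩
    refine ⟨p - i, ?_⟩
    have hdrop : (pvSubAt s i j).drop (p - i) = (s.drop p).take (j + 1 - p) := by
      rw [pv_subAt_drop s i j (p - i)]
      have h1 : i + (p - i) = p := by omega
      have h2 : j + 1 - i - (p - i) = j + 1 - p := by omega
      rw [h1, h2]
    rw [hdrop]
    have heq : ((s.drop p).take (j + 1 - p)).take t.length = t := by
      rw [List.take_take]
      have hmin : min t.length (j + 1 - p) = t.length := by omega
      rw [hmin]
      exact ht
    rw [← heq]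
    exact List.take_prefix _ _

theorem pv_count_eq (s t : List Char) :
    ((pvGetAllSubstrings s).countP (fun x => PySem.Chars.isIn t x)) = (pvResult s t).length := by
  rw [List.countP_eq_length_filter]
  have hfn : ((pvGetAllSubstrings s).filter (fun x => PySem.Chars.isIn t x)).Nodup :=
    (pv_nodupA s).filter _
  have hperm : ((pvGetAllSubstrings s).filter (fun x => PySem.Chars.isIn t x)).Perm (pvResult s t) := by
    rw [List.perm_ext_iff_of_nodup hfn (pv_nodupB s t)]
    intro x
    rw [List.mem_filter, pv_memA, pv_memB]
    constructor
    · rintro ⟨⟨i, j, hij, hjn, hx⟩, hin⟩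
      rw [hx] at hin
      obtain ⟨p, hip, hpj, hocc⟩ := (pv_core s t i j hij hjn).mp hin
      exact ⟨p, i, j, hocc, by omega, hip, hij, hpj, hjn, hx⟩
    · rintro ⟨p, i, j, hocc, hpn, hip, hij, hpj, hjn, hx⟩
      refine ⟨⟨i, j, hij, hjn, hx⟩, ?_⟩
      rw [hx]
      exact (pv_core s t i j hij hjn).mpr ⟨p, hip, hpj, hocc⟩
  exact hperm.length_eq

-- ===== VERDICT (by name: the statement is the Claim_ definition above) =====
theorem count_substrings_containing_t_spec : Claim_equal_count_substrings_containing_t := by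
  intro S T _
  unfold Spec_count_substrings_containing_t count_substrings_containing_t count_substrings_containing_t_alt
  rw [PySem.List.foldl_count_if, pv_count_eq S.toList T.toList]
  simp [PySem.Set.len]
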